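-- pv_equiv track=rewrite | github.com/martinstaebler/codewars | Strange_STrings_Parser.py | word_splitter_2
-- ===== SOURCE A (Python) =====
-- def word_splitter_2(string1):
--
--     dict_special = {}
--     highest_key = ""
--     for character in string1:
--         if not character.isalnum():
--             if character in dict_special:
--                 dict_special[character] = dict_special[character] + 1
--             else:
--                 dict_special[character] = 1
--     highest_key = list(dict_special.keys())[0]
--     for key in dict_special:
--         if dict_special[highest_key] < dict_special[key]:
--             highest_key = key
--     return string1.split(highest_key)
-- ===== SOURCE B (Python) =====
-- def word_splitter_2(string1):
--     first_pos = {}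
--     for i, character in enumerate(string1):
--         if not character.isalnum() and character not in first_pos:
--             first_pos[character] = i
--     ranked = sorted(first_pos, key=lambda c: (-string1.count(c), first_pos[c]))
--     return string1.split(ranked[0])
-- ===== Notes on version B (the rewrite author's own statement) =====
-- stated objective: alternative
-- what changed: B records only each special character's first position, then sorts the candidates by the composite rank (-count, first position) and splits on the head of the sorted list, instead of A's streaming frequency dictionary followed by an explicit keep-first max scan; same first-appearance tie-break and the same IndexError on inputs with no special character.
-- outside the precondition, e.g. on word_splitter_2('abc'): A raises IndexError, B raises IndexError
import Mathlib
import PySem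

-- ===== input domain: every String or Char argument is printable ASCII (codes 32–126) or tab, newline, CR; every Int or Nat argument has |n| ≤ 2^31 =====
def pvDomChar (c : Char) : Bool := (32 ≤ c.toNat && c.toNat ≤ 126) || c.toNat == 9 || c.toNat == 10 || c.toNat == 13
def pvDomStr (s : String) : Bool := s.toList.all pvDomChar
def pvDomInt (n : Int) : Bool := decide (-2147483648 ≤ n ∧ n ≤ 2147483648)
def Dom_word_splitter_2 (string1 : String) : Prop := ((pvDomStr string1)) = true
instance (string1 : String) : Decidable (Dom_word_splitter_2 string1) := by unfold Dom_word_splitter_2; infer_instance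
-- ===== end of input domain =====

-- B replaces A's streaming frequency dictionary and explicit max-scan by a sort:
-- it records each special character's FIRST position, sorts the candidates by the
-- composite rank (-count, first position) and splits on the first one (alternative
-- algorithm, same outputs and same IndexError on inputs without special characters).

-- ===== PORT A =====
def word_splitter_2 (string1 : String) : List String :=
  let dict_special : PySem.Dict Char Int :=
    string1.toList.foldl (fun d character =>
      if !(PySem.Chars.isalnum character) then
        if d.contains character then
          -- d[character] is present here, so getD reads exactly d[character]
          d.insert character (d.getD character 0 + 1)
        else d.insert character 1
      else d) PySem.Dict.empty
  -- list(dict_special.keys())[0]: Python raises IndexError when empty — excluded by Pre_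
  match PySem.List.pyGet? dict_special.keys 0 with
  | none => []
  | some h0 =>
    let highest_key := dict_special.keys.foldl
      (fun hk key => if dict_special.getD hk 0 < dict_special.getD key 0 then key else hk) h0
    (PySem.Chars.splitOn string1.toList [highest_key]).map String.ofList  -- s.split(sep), sep ≠ "": exact

-- ===== PORT B =====
def word_splitter_2_alt (string1 : String) : List String :=
  let first_pos : PySem.Dict Char Int :=
    (PySem.List.enumerate string1.toList).foldl (fun d p =>
      if !(PySem.Chars.isalnum p.2) && !(d.contains p.2) then d.insert p.2 p.1 else d)
      PySem.Dict.empty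
  let ranked := PySem.List.sorted2 first_pos.keys
      (fun c => -((PySem.Str.count string1 (String.ofList [c]) : Nat) : Int))
      (fun c => first_pos.getD c 0)  -- first_pos[c]: present for every c in the keys
  -- ranked[0]: Python raises IndexError when ranked is empty — excluded by Pre_
  match PySem.List.pyGet? ranked 0 with
  | none => []
  | some best => (PySem.Chars.splitOn string1.toList [best]).map String.ofList  -- s.split(sep), sep ≠ "": exact

-- ===== PRECONDITION & SPEC =====
-- Pre_ excludes inputs with no non-alphanumeric character (including ""), on which
-- both A and B raise (IndexError on the [0] of an empty candidate list).
def Pre_word_splitter_2 (string1 : String) : Prop :=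
  string1.toList.any (fun c => !(PySem.Chars.isalnum c)) = true
instance (string1 : String) : Decidable (Pre_word_splitter_2 string1) := by
  unfold Pre_word_splitter_2; infer_instance

def pvWitness_word_splitter_2 : String := "a b,c b"

def Spec_word_splitter_2 (string1 : String) (out : List String) : Prop := out = word_splitter_2_alt string1
instance (string1 : String) (out : List String) : Decidable (Spec_word_splitter_2 string1 out) := by unfold Spec_word_splitter_2; infer_instance

-- ===== CLAIM (what is proved, stated in full; the proofs are below) =====
def Claim_equal_word_splitter_2 : Prop := ∀ (string1 : String), Dom_word_splitter_2 string1 → Pre_word_splitter_2 string1 → Spec_word_splitter_2 string1 (word_splitter_2 string1)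

-- ===== LEMMAS AND PROOFS =====

-- A's dict-building loop is the counter of the special characters.
lemma dict_eq_counter (l : List Char) :
    l.foldl (fun d character =>
      if !(PySem.Chars.isalnum character) then
        if d.contains character then d.insert character (d.getD character 0 + 1)
        else d.insert character 1
      else d) PySem.Dict.empty
    = PySem.Dict.counter (l.filter (fun c => !(PySem.Chars.isalnum c))) := by
  have h1 : l.foldl (fun d character =>
      if !(PySem.Chars.isalnum character) then
        if d.contains character then d.insert character (d.getD character 0 + 1)
        else d.insert character 1
      else d) (PySem.Dict.empty : PySem.Dict Char Int)
    = l.foldl (fun d character =>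
      if !(PySem.Chars.isalnum character) then d.insert character (d.getD character 0 + 1)
      else d) (PySem.Dict.empty : PySem.Dict Char Int) := by
    apply PySem.List.foldl_congr_mem
    intro d c _
    by_cases hc : d.contains c = true
    · simp [hc]
    · simp only [Bool.not_eq_true] at hc
      simp [hc, PySem.Dict.getD_of_not_contains d 0 hc]
  refine h1.trans ?_
  rw [PySem.List.foldl_if_eq_foldl_filter,
    PySem.Dict.foldl_insert_getD_add_one_eq_counter]

-- Python's s.count(c) for a one-character needle is the character count.
lemma chars_count_single (l : List Char) (c : Char) :
    PySem.Chars.count l [c] = l.count c := by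
  have go : ∀ (fuel : Nat) (l : List Char) (acc : Nat), l.length ≤ fuel →
      PySem.Chars.count.go [c] fuel l acc = acc + l.count c := by
    intro fuel
    induction fuel with
    | zero =>
      intro l acc h
      have : l = [] := List.eq_nil_of_length_eq_zero (Nat.le_zero.mp h)
      subst this
      simp [PySem.Chars.count.go]
    | succ n ih =>
      intro l acc h
      cases l with
      | nil => simp [PySem.Chars.count.go]
      | cons hd t =>
        simp only [List.length_cons, Nat.succ_le_succ_iff] at h
        by_cases hc : c = hd
        · subst hc
          have hp : [c].isPrefixOf (c :: t) = true := by simp [List.isPrefixOf]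
          simp only [PySem.Chars.count.go, hp, if_pos]
          rw [ih _ _ (by simpa using h)]
          simp
          omega
        · have hp : [c].isPrefixOf (hd :: t) = false := by
            simp [List.isPrefixOf, hc]
          simp only [PySem.Chars.count.go, hp]
          rw [if_neg (by simp), ih _ _ h]
          simp [List.count_cons]
          exact fun h' => hc (Eq.symm h')
  simp only [PySem.Chars.count, List.isEmpty_cons, Bool.false_eq_true, if_false]
  rw [go _ _ _ (le_refl _)]
  simp

-- B's first_pos loop: keys are the distinct special characters in first-appearance
-- order, with strictly increasing stored positions (the build invariant).
lemma build_inv (l : List Char) : ∀ (s₀ : Int) (d : PySem.Dict Char Int),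
    d.keys.Nodup →
    (d.items.map Prod.snd).Pairwise (· < ·) →
    (∀ v ∈ d.items.map Prod.snd, v < s₀) →
    ((PySem.List.enumerate l s₀).foldl (fun d p =>
        if !(PySem.Chars.isalnum p.2) && !(d.contains p.2) then d.insert p.2 p.1 else d) d).keys
      = PySem.Set.update d.keys (l.filter (fun c => !(PySem.Chars.isalnum c))) ∧
    ((PySem.List.enumerate l s₀).foldl (fun d p =>
        if !(PySem.Chars.isalnum p.2) && !(d.contains p.2) then d.insert p.2 p.1 else d) d).keys.Nodup ∧
    (((PySem.List.enumerate l s₀).foldl (fun d p =>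
        if !(PySem.Chars.isalnum p.2) && !(d.contains p.2) then d.insert p.2 p.1 else d) d).items.map Prod.snd).Pairwise (· < ·) ∧
    (∀ v ∈ ((PySem.List.enumerate l s₀).foldl (fun d p =>
        if !(PySem.Chars.isalnum p.2) && !(d.contains p.2) then d.insert p.2 p.1 else d) d).items.map Prod.snd,
      v < s₀ + l.length) := by
  induction l with
  | nil =>
    intro s₀ d hnd hpw hlt
    refine ⟨rfl, hnd, hpw, ?_⟩
    intro v hv
    have := hlt v hv
    simp only [List.length_nil]
    omega
  | cons c l ih =>
    intro s₀ d hnd hpw hlt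
    rw [PySem.List.enumerate_cons]
    simp only [List.foldl_cons, List.filter_cons]
    by_cases hs : PySem.Chars.isalnum c = true
    · -- not special: step is identity
      simp only [hs, Bool.not_true, Bool.false_and, Bool.false_eq_true, if_false]
      have := ih (s₀ + 1) d hnd hpw (fun v hv => by have := hlt v hv; omega)
      simp only at this ⊢
      refine ⟨?_, this.2.1, this.2.2.1, ?_⟩
      · rw [this.1]
      · intro v hv
        have := this.2.2.2 v hv
        simp only [List.length_cons]
        omega
    · simp only [hs, Bool.not_false] at *
      by_cases hm : d.contains c = true
      · -- already present: step is identity; Set.add also keeps the set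
        simp only [hm, Bool.not_true, Bool.and_false, Bool.false_eq_true, if_false]
        have hmem : c ∈ d.keys := (PySem.Dict.contains_iff_mem_keys d c).mp hm
        have := ih (s₀ + 1) d hnd hpw (fun v hv => by have := hlt v hv; omega)
        refine ⟨?_, this.2.1, this.2.2.1, ?_⟩
        · rw [if_pos trivial, this.1, PySem.Set.update_cons, PySem.Set.add_of_mem hmem]
        · intro v hv
          have := this.2.2.2 v hv
          simp only [List.length_cons]
          omega
      · -- fresh special key: insert appends
        simp only [hm, Bool.not_false, Bool.and_true, if_pos]
        have hmf : d.contains c = false := by simpa using hm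
        have hkeys : (d.insert c s₀).keys = d.keys ++ [c] :=
          PySem.Dict.keys_insert_of_not_contains d s₀ hmf
        have hitems : (d.insert c s₀).items = d.items ++ [(c, s₀)] :=
          PySem.Dict.items_insert_of_not_contains d s₀ hmf
        have hnd' : (d.insert c s₀).keys.Nodup :=
          PySem.Dict.nodup_keys_insert d c s₀ hnd
        have hpw' : ((d.insert c s₀).items.map Prod.snd).Pairwise (· < ·) := by
          rw [hitems]
          simp only [List.map_append, List.map_cons, List.map_nil]
          rw [List.pairwise_append]
          exact ⟨hpw, by simp, by intro a ha b hb; simp at hb; subst hb; exact hlt a ha⟩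
        have hlt' : ∀ v ∈ (d.insert c s₀).items.map Prod.snd, v < s₀ + 1 := by
          rw [hitems]
          intro v hv
          simp only [List.map_append, List.map_cons, List.map_nil, List.mem_append,
            List.mem_cons, List.not_mem_nil, or_false] at hv
          rcases hv with hv | hv
          · have := hlt v hv; omega
          · omega
        have := ih (s₀ + 1) (d.insert c s₀) hnd' hpw' hlt'
        refine ⟨?_, this.2.1, this.2.2.1, ?_⟩
        · rw [this.1, hkeys, PySem.Set.update_cons, PySem.Set.add_of_not_mem
            (fun hmem => absurd ((PySem.Dict.contains_iff_mem_keys d c).mpr hmem) (by simp [hmf]))]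
        · intro v hv
          have := this.2.2.2 v hv
          simp only [List.length_cons]
          omega

-- head of Python's insertion sort: the fold over the comparator keeping the current
-- element on ties (sorted(...)[0] as a running minimum).
lemma head_foldl_insertBy {α : Type} (before : α → α → Bool) (l : List α) :
    ∀ (h : α) (t : List α), ∃ t',
      l.foldl (fun acc x => PySem.List.insertBy before x acc) (h :: t)
        = (l.foldl (fun a x => if before x a then x else a) h) :: t' := by
  induction l with
  | nil => intro h t; exact ⟨t, rfl⟩
  | cons x xs ih =>
    intro h t
    simp only [List.foldl_cons]
    have hstep : PySem.List.insertBy before x (h :: t)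
        = if before x h then x :: h :: t else h :: PySem.List.insertBy before x t := by
      simp [PySem.List.insertBy]
    rw [hstep]
    by_cases hb : before x h = true
    · simp only [hb, if_pos]
      exact ih x (h :: t)
    · rw [if_neg hb, if_neg hb]
      exact ih h (PySem.List.insertBy before x t)

-- A's keep-first max scan equals B's lexicographic running minimum when the
-- tie-break key is strictly increasing along the scanned list.
lemma fold_sel_eq (cntA k1 p : Char → Int) : ∀ (l : List Char) (a : Char),
    (∀ x ∈ a :: l, cntA x = -k1 x) →
    (∀ x ∈ l, p a < p x) → l.Pairwise (fun x y => p x < p y) →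
    l.foldl (fun hk k => if cntA hk < cntA k then k else hk) a
      = l.foldl (fun h x =>
          if (decide (k1 x < k1 h) || !decide (k1 h < k1 x) && decide (p x < p h)) = true
          then x else h) a := by
  intro l
  induction l with
  | nil => intro a _ _ _; rfl
  | cons x xs ih =>
    intro a hcnt hlt hpw
    have hax : p a < p x := hlt x (by simp)
    have hca : cntA a = -k1 a := hcnt a (by simp)
    have hcx : cntA x = -k1 x := hcnt x (by simp)
    have hstep : (if cntA a < cntA x then x else a)
        = (if (decide (k1 x < k1 a) || !decide (k1 a < k1 x) && decide (p x < p a)) = true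
           then x else a) := by
      rw [hca, hcx]
      by_cases hc : -k1 a < -k1 x
      · have h1 : k1 x < k1 a := by omega
        simp [hc, h1]
      · have h1 : ¬ (k1 x < k1 a) := by omega
        have h2 : ¬ (p x < p a) := by omega
        simp [hc, h1, h2]
    simp only [List.foldl_cons]
    rw [← hstep]
    rcases List.pairwise_cons.mp hpw with ⟨hx, hpw'⟩
    by_cases hc : cntA a < cntA x
    · rw [if_pos hc]
      exact ih x (fun y hy => hcnt y (by simp at hy ⊢; tauto)) hx hpw'
    · rw [if_neg hc]
      exact ih a (fun y hy => hcnt y (by simp at hy ⊢; tauto))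
        (fun y hy => hlt y (by simp [hy])) hpw'

-- ===== VERDICT (by name: the statement is the Claim_ definition above) =====
theorem word_splitter_2_spec : Claim_equal_word_splitter_2 := by
  intro s _ hpre
  unfold Spec_word_splitter_2
  simp only [word_splitter_2, word_splitter_2_alt]
  rw [dict_eq_counter, PySem.Dict.keys_counter]
  set F := s.toList.filter (fun c => !(PySem.Chars.isalnum c)) with hF
  -- the B-side dictionary and its build invariant
  set fp := (PySem.List.enumerate s.toList).foldl (fun d p =>
      if !(PySem.Chars.isalnum p.2) && !(d.contains p.2) then d.insert p.2 p.1 else d)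
      (PySem.Dict.empty : PySem.Dict Char Int) with hfp
  have hinv := build_inv s.toList 0 PySem.Dict.empty (by simp) (by simp [PySem.Dict.empty]) (by simp [PySem.Dict.empty])
  rw [← hfp] at hinv
  obtain ⟨hkeys, hnd, hpwi, -⟩ := hinv
  rw [PySem.Dict.keys_empty,
    show PySem.Set.update ([] : List Char) (s.toList.filter (fun c => !(PySem.Chars.isalnum c)))
        = PySem.Set.ofList (s.toList.filter (fun c => !(PySem.Chars.isalnum c))) from
      PySem.Set.update_empty _, ← hF] at hkeys
  -- keys strictly increase under the stored first positions
  have hkpw : fp.keys.Pairwise (fun a b => fp.getD a 0 < fp.getD b 0) := by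
    have hitems : fp.items.Pairwise (fun u v => u.2 < v.2) := (List.pairwise_map).mp hpwi
    have : fp.items.Pairwise (fun u v => fp.getD u.1 0 < fp.getD v.1 0) := by
      refine hitems.imp_of_mem ?_
      intro u v hu hv huv
      rw [PySem.Dict.getD_of_mem_items fp (by simpa using hu) hnd 0,
        PySem.Dict.getD_of_mem_items fp (by simpa using hv) hnd 0]
      exact huv
    have h2 := (List.pairwise_map (f := fun x : Char × Int => x.1)
      (R := fun a b => fp.getD a 0 < fp.getD b 0)).mpr this
    simpa only [PySem.Dict.keys] using h2
  -- the candidate list is nonempty under Pre_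
  have hFne : F ≠ [] := by
    unfold Pre_word_splitter_2 at hpre
    simp only [List.any_eq_true] at hpre
    obtain ⟨c, hc, hcp⟩ := hpre
    intro hnil
    have : c ∈ F := by rw [hF]; exact List.mem_filter.mpr ⟨hc, hcp⟩
    simp [hnil] at this
  have hSne : PySem.Set.ofList F ≠ [] := by
    obtain ⟨c, hc⟩ := List.exists_mem_of_ne_nil F hFne
    intro hnil
    have : c ∈ PySem.Set.ofList F := (PySem.Set.mem_ofList F c).mpr hc
    simp [hnil] at this
  obtain ⟨h0, rest, hS⟩ := List.exists_cons_of_ne_nil hSne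
  rw [hkeys, hS]
  rw [hkeys, hS] at hkpw
  rw [hS] at hkeys
  -- A's head index
  have hgetA : PySem.List.pyGet? (h0 :: rest) (0 : Int) = some h0 := by
    simp [PySem.List.pyGet?, PySem.List.pyIdx?]
  rw [hgetA]
  -- B's sorted head: the running lexicographic minimum
  have hsorted : PySem.List.sorted2 (h0 :: rest)
      (fun c => -((PySem.Str.count s (String.ofList [c]) : Nat) : Int))
      (fun c => fp.getD c 0)
      = ((h0 :: rest).foldl (fun acc x => PySem.List.insertBy
          (fun a b => decide ((fun c => -((PySem.Str.count s (String.ofList [c]) : Nat) : Int)) a < (fun c => -((PySem.Str.count s (String.ofList [c]) : Nat) : Int)) b)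
            || !decide ((fun c => -((PySem.Str.count s (String.ofList [c]) : Nat) : Int)) b < (fun c => -((PySem.Str.count s (String.ofList [c]) : Nat) : Int)) a)
              && decide ((fun c => fp.getD c 0) a < (fun c => fp.getD c 0) b)) x acc) []) := by
    rfl
  rw [hsorted]
  simp only [List.foldl_cons]
  have hins0 : PySem.List.insertBy (fun a b =>
      decide (-((PySem.Str.count s (String.ofList [a]) : Nat) : Int) < -((PySem.Str.count s (String.ofList [b]) : Nat) : Int))
        || !decide (-((PySem.Str.count s (String.ofList [b]) : Nat) : Int) < -((PySem.Str.count s (String.ofList [a]) : Nat) : Int))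
          && decide (fp.getD a 0 < fp.getD b 0)) h0 [] = [h0] := by
    simp [PySem.List.insertBy]
  rw [hins0]
  obtain ⟨t', ht'⟩ := head_foldl_insertBy (fun a b =>
      decide (-((PySem.Str.count s (String.ofList [a]) : Nat) : Int) < -((PySem.Str.count s (String.ofList [b]) : Nat) : Int))
        || !decide (-((PySem.Str.count s (String.ofList [b]) : Nat) : Int) < -((PySem.Str.count s (String.ofList [a]) : Nat) : Int))
          && decide (fp.getD a 0 < fp.getD b 0)) rest h0 []
  rw [ht', PySem.List.pyGet?_zero_cons]
  -- counts agree on every candidate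
  have hcnt : ∀ x ∈ h0 :: rest,
      (PySem.Dict.counter F).getD x 0
        = -(-((PySem.Str.count s (String.ofList [x]) : Nat) : Int)) := by
    intro x hx
    have hxS : x ∈ PySem.Set.ofList F := by rw [hS]; exact hx
    have hxF : x ∈ F := (PySem.Set.mem_ofList F x).mp hxS
    have hxp : (!(PySem.Chars.isalnum x)) = true := (List.mem_filter.mp hxF).2
    rw [PySem.Dict.getD_counter]
    have hcount : PySem.Str.count s (String.ofList [x]) = s.toList.count x := by
      rw [PySem.Str.count_eq]
      simp only [String.toList_ofList]
      exact chars_count_single s.toList x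
    have hcf := List.count_filter (l := s.toList)
      (p := fun c => !(PySem.Chars.isalnum c)) (a := x) hxp
    rw [hcount, hF, hcf]
    omega
  rcases List.pairwise_cons.mp hkpw with ⟨hh0, hrestpw⟩
  -- A folds over the full key list: the first self-comparison keeps h0
  simp only [if_neg (lt_irrefl ((PySem.Dict.counter F).getD h0 0))]
  rw [fold_sel_eq ((PySem.Dict.counter F).getD · 0)
      (fun c => -((PySem.Str.count s (String.ofList [c]) : Nat) : Int))
      (fun c => fp.getD c 0) rest h0 hcnt hh0 hrestpw]
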